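-- pv_equiv track=rewrite | github.com/danieljstvincent/DS-A | 01pre_leetcode/00frist_100_questions/answers.py | question6
-- ===== SOURCE A (Python) =====
-- def question6(input_string):
--     counts = {'digits': 0,
--               'letters': 0,
--               'spaces': 0
--     }
--
--     for char in input_string:
--         if char.isdigit():
--             counts['digits'] += 1
--         elif char.isalpha():
--             counts['letters'] += 1
--         elif char.isspace() :
--             counts['spaces'] += 1
--
--     return counts
-- ===== SOURCE B (Python) =====
-- def question6(input_string):
--     # simpler: each category is its own independent scan; the three predicates
--     # are mutually exclusive, so the counts match the fused if/elif loop.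
--     return {'digits': sum(1 for c in input_string if c.isdigit()),
--             'letters': sum(1 for c in input_string if c.isalpha()),
--             'spaces': sum(1 for c in input_string if c.isspace())}
-- ===== Notes on version B (the rewrite author's own statement) =====
-- stated objective: simpler
-- what changed: Replaces the single fused if/elif/elif loop updating a mutable dict with three independent predicate scans whose counts are assembled directly into the result dict.
import Mathlib
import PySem

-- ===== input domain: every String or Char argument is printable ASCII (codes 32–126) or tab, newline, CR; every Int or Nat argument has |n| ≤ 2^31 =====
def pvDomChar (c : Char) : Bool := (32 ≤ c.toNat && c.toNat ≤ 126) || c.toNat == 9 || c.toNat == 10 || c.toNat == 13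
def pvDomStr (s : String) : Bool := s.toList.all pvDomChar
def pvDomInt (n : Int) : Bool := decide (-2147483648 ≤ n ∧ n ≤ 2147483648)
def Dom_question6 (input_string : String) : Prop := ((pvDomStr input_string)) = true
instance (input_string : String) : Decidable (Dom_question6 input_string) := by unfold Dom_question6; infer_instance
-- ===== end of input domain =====

-- B replaces A's fused if/elif loop over a mutable dict with three independent predicate scans (objective: simpler).

-- ===== PORT A =====
-- fused loop: one dict accumulator, if/elif/elif updates
def question6 (input_string : String) : List (String × Int) :=
  (input_string.toList.foldl
    (fun counts c =>
      if PySem.Chars.isdigit c then counts.insert "digits" (counts.getD "digits" 0 + 1)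
      else if PySem.Chars.isalpha c then counts.insert "letters" (counts.getD "letters" 0 + 1)
      else if PySem.Chars.isspace c then counts.insert "spaces" (counts.getD "spaces" 0 + 1)
      else counts)
    (PySem.Dict.ofList [("digits", (0:Int)), ("letters", 0), ("spaces", 0)])).items

-- ===== PORT B =====
-- three independent scans, result assembled directly
def question6_alt (input_string : String) : List (String × Int) :=
  [("digits", (input_string.toList.countP PySem.Chars.isdigit : Int)),
   ("letters", (input_string.toList.countP PySem.Chars.isalpha : Int)),
   ("spaces", (input_string.toList.countP PySem.Chars.isspace : Int))]

-- ===== PRECONDITION & SPEC =====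
def Spec_question6 (input_string : String) (out : List (String × Int)) : Prop := out = question6_alt input_string
instance (input_string : String) (out : List (String × Int)) : Decidable (Spec_question6 input_string out) := by unfold Spec_question6; infer_instance

-- ===== CLAIM (what is proved, stated in full; the proofs are below) =====
def Claim_equal_question6 : Prop := ∀ (input_string : String), Dom_question6 input_string → Spec_question6 input_string (question6 input_string)

-- ===== LEMMAS AND PROOFS =====

-- the three Python predicates are mutually exclusive (on every Char)
lemma digit_not_alpha (c : Char) (h : PySem.Chars.isdigit c = true) : PySem.Chars.isalpha c = false := by
  simp only [PySem.Chars.isdigit, PySem.Chars.isalpha, PySem.Chars.isupper, PySem.Chars.islower,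
    Bool.and_eq_true, Bool.or_eq_false_iff, Bool.and_eq_false_iff, decide_eq_true_eq,
    decide_eq_false_iff_not, Char.le_def, UInt32.le_iff_toNat_le] at *
  have h0 : ('0':Char).val.toNat = 48 := rfl
  have h9 : ('9':Char).val.toNat = 57 := rfl
  have hA : ('A':Char).val.toNat = 65 := rfl
  have hZ : ('Z':Char).val.toNat = 90 := rfl
  have ha : ('a':Char).val.toNat = 97 := rfl
  have hz : ('z':Char).val.toNat = 122 := rfl
  omega

lemma digit_not_space (c : Char) (h : PySem.Chars.isdigit c = true) : PySem.Chars.isspace c = false := by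
  simp only [PySem.Chars.isdigit, PySem.Chars.isspace, Char.toNat, Bool.and_eq_true,
    Bool.or_eq_false_iff, Bool.and_eq_false_iff, decide_eq_true_eq, decide_eq_false_iff_not,
    Char.le_def, UInt32.le_iff_toNat_le] at *
  have h0 : ('0':Char).val.toNat = 48 := rfl
  have h9 : ('9':Char).val.toNat = 57 := rfl
  omega

lemma alpha_not_space (c : Char) (h : PySem.Chars.isalpha c = true) : PySem.Chars.isspace c = false := by
  simp only [PySem.Chars.isalpha, PySem.Chars.isupper, PySem.Chars.islower, PySem.Chars.isspace,
    Char.toNat, Bool.or_eq_true, Bool.and_eq_true, Bool.or_eq_false_iff, Bool.and_eq_false_iff,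
    decide_eq_true_eq, decide_eq_false_iff_not, Char.le_def, UInt32.le_iff_toNat_le] at *
  have hA : ('A':Char).val.toNat = 65 := rfl
  have hZ : ('Z':Char).val.toNat = 90 := rfl
  have ha : ('a':Char).val.toNat = 97 := rfl
  have hz : ('z':Char).val.toNat = 122 := rfl
  omega

-- one step of A's loop on the three-key literal state
lemma ins_digits (a b s : Int) :
    (PySem.Dict.mk [("digits", a), ("letters", b), ("spaces", s)]).insert "digits"
      ((PySem.Dict.mk [("digits", a), ("letters", b), ("spaces", s)]).getD "digits" 0 + 1)
    = PySem.Dict.mk [("digits", a + 1), ("letters", b), ("spaces", s)] := by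
  simp [PySem.Dict.insert, PySem.Dict.getD, PySem.Dict.get?, PySem.Dict.contains]

lemma ins_letters (a b s : Int) :
    (PySem.Dict.mk [("digits", a), ("letters", b), ("spaces", s)]).insert "letters"
      ((PySem.Dict.mk [("digits", a), ("letters", b), ("spaces", s)]).getD "letters" 0 + 1)
    = PySem.Dict.mk [("digits", a), ("letters", b + 1), ("spaces", s)] := by
  simp [PySem.Dict.insert, PySem.Dict.getD, PySem.Dict.get?, PySem.Dict.contains]

lemma ins_spaces (a b s : Int) :
    (PySem.Dict.mk [("digits", a), ("letters", b), ("spaces", s)]).insert "spaces"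
      ((PySem.Dict.mk [("digits", a), ("letters", b), ("spaces", s)]).getD "spaces" 0 + 1)
    = PySem.Dict.mk [("digits", a), ("letters", b), ("spaces", s + 1)] := by
  simp [PySem.Dict.insert, PySem.Dict.getD, PySem.Dict.get?, PySem.Dict.contains]

-- loop invariant: A's fused fold from any three-key state adds the three counts
lemma foldl_counts (l : List Char) (a b s : Int) :
    l.foldl
      (fun counts c =>
        if PySem.Chars.isdigit c then counts.insert "digits" (counts.getD "digits" 0 + 1)
        else if PySem.Chars.isalpha c then counts.insert "letters" (counts.getD "letters" 0 + 1)
        else if PySem.Chars.isspace c then counts.insert "spaces" (counts.getD "spaces" 0 + 1)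
        else counts)
      (PySem.Dict.mk [("digits", a), ("letters", b), ("spaces", s)])
    = PySem.Dict.mk [("digits", a + l.countP PySem.Chars.isdigit),
                     ("letters", b + l.countP PySem.Chars.isalpha),
                     ("spaces", s + l.countP PySem.Chars.isspace)] := by
  induction l generalizing a b s with
  | nil => simp
  | cons c t ih =>
    simp only [List.foldl_cons, List.countP_cons]
    by_cases hd : PySem.Chars.isdigit c = true
    · rw [if_pos hd, ins_digits, ih]
      simp [hd, digit_not_alpha c hd, digit_not_space c hd]
      ring
    · rw [if_neg hd]
      by_cases hl : PySem.Chars.isalpha c = true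
      · rw [if_pos hl, ins_letters, ih]
        simp [hd, hl, alpha_not_space c hl]
        ring
      · rw [if_neg hl]
        by_cases hs : PySem.Chars.isspace c = true
        · rw [if_pos hs, ins_spaces, ih]
          simp [hd, hl, hs]
          ring
        · rw [if_neg hs, ih]
          simp [hd, hl, hs]

-- ===== VERDICT (by name: the statement is the Claim_ definition above) =====
theorem question6_spec : Claim_equal_question6 := by
  intro s _
  unfold Spec_question6 question6 question6_alt
  rw [show PySem.Dict.ofList [("digits", (0:Int)), ("letters", 0), ("spaces", 0)]
      = PySem.Dict.mk [("digits", (0:Int)), ("letters", 0), ("spaces", 0)] from by decide,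
    foldl_counts]
  simp
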